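-- pv_equiv track=rewrite | github.com/jbloomlab/polyclonal | polyclonal/alphabets.py | biochem_order_aas
-- ===== SOURCE A (Python) =====
-- def biochem_order_aas(alphabet):
--     """Put amino-acids in "biochemical order" so ones with similar properties are nearby.
--
--     Parameters
--     ----------
--     alphabet : array-like
--         Amino-acid characters, can include stop (``*``) and gap (``-``).
--
--     Returns
--     -------
--     tuple
--         Contains the alphabet in biochemical order
--
--     Example
--     -------
--
--     >>> biochem_order_aas(AAS_WITHSTOP_WITHGAP)
--     ... # doctest: +NORMALIZE_WHITESPACE
--     ('R', 'K', 'H', 'D', 'E', 'Q', 'N', 'S', 'T', 'Y', 'W', 'F', 'A', 'I', 'L', 'M',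
--     'V', 'G', 'P', 'C', '-', '*')
--
--     """
--     sort_order = {
--         a: i
--         for i, a in enumerate(
--             [
--                 "R",
--                 "K",
--                 "H",
--                 "D",
--                 "E",
--                 "Q",
--                 "N",
--                 "S",
--                 "T",
--                 "Y",
--                 "W",
--                 "F",
--                 "A",
--                 "I",
--                 "L",
--                 "M",
--                 "V",
--                 "G",
--                 "P",
--                 "C",
--                 "-",
--                 "*",
--             ]
--         )
--     }
--
--     if len(alphabet) != len(set(alphabet)):
--         raise ValueError(f"Duplicate letters in {alphabet=}")
--
--     if not set(alphabet).issubset(sort_order):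
--         raise ValueError(f"Invalid letters in {alphabet=}")
--
--     return tuple(sorted(alphabet, key=lambda a: sort_order[a]))
-- ===== SOURCE B (Python) =====
-- _BIOCHEM = ["R","K","H","D","E","Q","N","S","T","Y","W","F","A","I","L","M","V","G","P","C","-","*"]
--
--
-- def biochem_order_aas(alphabet):
--     # Single pass: mark each letter's slot in a 22-entry presence table,
--     # detecting invalid letters and duplicates on the fly; then emit the
--     # canonical table's letters whose slot is marked.  No sort, no dict.
--     seen = [False] * len(_BIOCHEM)
--     for a in alphabet:
--         try:
--             i = _BIOCHEM.index(a)
--         except ValueError: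
--             raise ValueError(f"Invalid letters in {alphabet=}")
--         if seen[i]:
--             raise ValueError(f"Duplicate letters in {alphabet=}")
--         seen[i] = True
--     return tuple(x for x, s in zip(_BIOCHEM, seen) if s)
-- ===== Notes on version B (the rewrite author's own statement) =====
-- stated objective: alternative
-- what changed: Instead of building a position dict and sorting the input by it, B makes one pass over the input marking a 22-slot presence table indexed by the canonical order (catching invalid letters and duplicates on the fly), then emits the canonical letters whose slot is marked; no sort, no dict, no set.
import Mathlib
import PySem

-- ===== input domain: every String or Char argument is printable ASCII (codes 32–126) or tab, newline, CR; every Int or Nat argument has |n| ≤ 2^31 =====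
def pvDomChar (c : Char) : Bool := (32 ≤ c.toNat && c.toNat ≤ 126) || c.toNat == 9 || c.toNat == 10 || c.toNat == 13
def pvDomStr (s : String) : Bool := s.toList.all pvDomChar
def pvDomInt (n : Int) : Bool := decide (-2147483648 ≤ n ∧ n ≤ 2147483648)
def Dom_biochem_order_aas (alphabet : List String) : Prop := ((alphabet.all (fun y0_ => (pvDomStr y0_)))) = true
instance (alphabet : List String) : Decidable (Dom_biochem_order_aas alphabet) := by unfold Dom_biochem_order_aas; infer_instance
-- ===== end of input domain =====

-- B replaces dict-keyed sorting with one marking pass over a 22-slot presence table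
-- indexed by the canonical order, then emits the marked canonical letters (no sort).
-- A mutates nothing; equivalence is about the return value (tuple ↦ List String).

-- ===== PORT A =====
-- the literal list A's dict comprehension enumerates
def pvOrderList : List String :=
  ["R","K","H","D","E","Q","N","S","T","Y","W","F","A","I","L","M","V","G","P","C","-","*"]

def biochem_order_aas (alphabet : List String) : List String :=
  let sort_order : PySem.Dict String Int :=
    PySem.Dict.ofList ((PySem.List.enumerate pvOrderList 0).map (fun p => (p.2, p.1)))
  if alphabet.length ≠ (PySem.Set.ofList alphabet).length then []  -- raise ValueError: excluded by Pre_
  else if ¬ PySem.Set.issubset (PySem.Set.ofList alphabet) sort_order.keys then []  -- raise ValueError: excluded by Pre_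
  else PySem.List.sorted alphabet (fun a => sort_order.getD a 0) false  -- sort_order[a]; total form, key present under Pre_

-- ===== PORT B =====
-- B's canonical table
def pvBiochem : List String :=
  ["R","K","H","D","E","Q","N","S","T","Y","W","F","A","I","L","M","V","G","P","C","-","*"]

-- one loop step: look the letter up in the canonical table, fail on invalid or duplicate, mark its slot
def pvStep (st : Option (List Bool)) (a : String) : Option (List Bool) :=
  match st with
  | none => none
  | some seen =>
    match PySem.List.index? pvBiochem a with
    | none => none                               -- _BIOCHEM.index raises → ValueError: excluded by Pre_
    | some i =>
        if seen.getD i false then none           -- seen[i] (i < 22 = seen.length, so getD is exact); duplicate ValueError: excluded by Pre_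
        else some (seen.set i true)              -- seen[i] = True

def biochem_order_aas_alt (alphabet : List String) : List String :=
  match alphabet.foldl pvStep (some (List.replicate pvBiochem.length false)) with
  | none => []                                   -- a ValueError path: excluded by Pre_
  | some seen => ((pvBiochem.zip seen).filter (fun p => p.2)).map (fun p => p.1)

-- ===== PRECONDITION & SPEC =====
-- A raises ValueError on duplicate letters or letters outside the 22-letter biochemical alphabet; Pre_ excludes exactly those.
def Pre_biochem_order_aas (alphabet : List String) : Prop :=
  alphabet.Nodup ∧ ∀ a ∈ alphabet, a ∈ pvOrderList
instance (alphabet : List String) : Decidable (Pre_biochem_order_aas alphabet) := by unfold Pre_biochem_order_aas; infer_instance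

def pvWitness_biochem_order_aas : List String := ["A", "C", "R"]

def Spec_biochem_order_aas (alphabet : List String) (out : List String) : Prop := out = biochem_order_aas_alt alphabet
instance (alphabet : List String) (out : List String) : Decidable (Spec_biochem_order_aas alphabet out) := by unfold Spec_biochem_order_aas; infer_instance

-- ===== CLAIM (what is proved, stated in full; the proofs are below) =====
def Claim_equal_biochem_order_aas : Prop := ∀ (alphabet : List String), Dom_biochem_order_aas alphabet → Pre_biochem_order_aas alphabet → Spec_biochem_order_aas alphabet (biochem_order_aas alphabet)

-- ===== LEMMAS AND PROOFS =====

-- the presence table marking exactly the letters of S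
def pvSeenOf (S : List String) : List Bool := pvBiochem.map (fun x => decide (x ∈ S))

theorem pvBiochem_nodup : pvBiochem.Nodup := by decide

theorem pvSeenOf_set (S : List String) (a : String) (i : Nat)
    (hi : i < pvBiochem.length) (ha : pvBiochem[i] = a) :
    (pvSeenOf S).set i true = pvSeenOf (S ++ [a]) := by
  apply List.ext_getElem
  · simp [pvSeenOf]
  · intro j hj hj'
    have hjlen : j < pvBiochem.length := by simpa [pvSeenOf] using hj'
    by_cases hji : j = i
    · subst hji
      simp [pvSeenOf, ha]
    · have hne : pvBiochem[j] ≠ a := by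
        intro h
        exact hji ((List.Nodup.getElem_inj_iff pvBiochem_nodup).mp (h.trans ha.symm))
      simp only [pvSeenOf, List.getElem_map, List.getElem_set_ne (Ne.symm hji)]
      simp [hne]

theorem pv_fold_inv : ∀ (l S : List String), l.Nodup → (∀ a ∈ l, a ∈ pvBiochem) →
    (∀ a ∈ l, a ∉ S) →
    l.foldl pvStep (some (pvSeenOf S)) = some (pvSeenOf (S ++ l)) := by
  intro l
  induction l with
  | nil => intro S _ _ _; simp
  | cons a l ih =>
    intro S hnd hsub hdis
    have hmem : a ∈ pvBiochem := hsub a (List.mem_cons_self ..)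
    obtain ⟨i, hidx⟩ := (PySem.List.index?_isSome_iff pvBiochem a).mpr hmem |> Option.isSome_iff_exists.mp
    obtain ⟨hi, hga, -⟩ := PySem.List.getElem_of_index?_eq_some hidx
    have hgetD : (pvSeenOf S).getD i false = decide (a ∈ S) := by
      have : (pvSeenOf S)[i]? = some (decide (pvBiochem[i] ∈ S)) := by
        simp [pvSeenOf, List.getElem?_map, List.getElem?_eq_getElem hi]
      simp [List.getD, this, hga]
    have haS : a ∉ S := hdis a (List.mem_cons_self ..)
    have hstep : pvStep (some (pvSeenOf S)) a = some (pvSeenOf (S ++ [a])) := by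
      simp only [pvStep, hidx, hgetD, haS, decide_false, Bool.false_eq_true, if_false,
        pvSeenOf_set S a i hi hga]
    rw [List.foldl_cons, hstep,
      ih (S ++ [a]) (List.Nodup.of_cons hnd) (fun b hb => hsub b (List.mem_cons_of_mem a hb))
        (fun b hb => by
          simp only [List.mem_append, List.mem_singleton]
          rintro (h | rfl)
          · exact hdis b (List.mem_cons_of_mem a hb) h
          · exact (List.nodup_cons.mp hnd).1 hb)]
    congr 1
    rw [List.append_assoc]
    rfl

theorem pv_zip_filter_map {α : Type} (l : List α) (f : α → Bool) :
    (((l.zip (l.map f)).filter (fun p => p.2)).map (fun p => p.1)) = l.filter f := by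
  induction l with
  | nil => rfl
  | cons a l ih =>
    simp only [List.map_cons, List.zip_cons_cons, List.filter_cons]
    cases h : f a <;> simp [ih]

theorem pvOrder_pairwise :
    pvOrderList.Pairwise (fun a b =>
      (PySem.Dict.ofList ((PySem.List.enumerate pvOrderList 0).map (fun p => (p.2, p.1)))).getD a 0 <
      (PySem.Dict.ofList ((PySem.List.enumerate pvOrderList 0).map (fun p => (p.2, p.1)))).getD b 0) := by
  decide

-- A's sorted output is the canonical list filtered to the input's letters
theorem pv_A_filter (alphabet : List String) (hnd : alphabet.Nodup)
    (hsub : ∀ a ∈ alphabet, a ∈ pvOrderList) :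
    biochem_order_aas alphabet = pvOrderList.filter (fun a => decide (a ∈ alphabet)) := by
  have hof : PySem.Set.ofList alphabet = alphabet := PySem.Set.ofList_eq_self_of_nodup alphabet hnd
  unfold biochem_order_aas
  simp only [hof]
  have hkeys : (PySem.Dict.ofList ((PySem.List.enumerate pvOrderList 0).map (fun p => (p.2, p.1)))).keys
      = pvOrderList := by decide
  have hsubA : PySem.Set.issubset alphabet
      (PySem.Dict.ofList ((PySem.List.enumerate pvOrderList 0).map (fun p => (p.2, p.1)))).keys = true := by
    rw [hkeys, PySem.Set.issubset_iff]; exact hsub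
  rw [if_neg (by simp), if_neg (by simp [hsubA])]
  apply PySem.List.sorted_eq_of_perm_of_pairwise_lt
  · rw [List.perm_ext_iff_of_nodup (List.Nodup.filter _ (by decide)) hnd]
    intro a
    simp only [List.mem_filter, decide_eq_true_eq]
    exact ⟨fun h => h.2, fun h => ⟨hsub a h, h⟩⟩
  · exact List.Pairwise.filter _ pvOrder_pairwise

-- ===== VERDICT =====
theorem biochem_order_aas_spec : Claim_equal_biochem_order_aas := by
  intro alphabet _ hpre
  obtain ⟨hnd, hsub⟩ := hpre
  unfold Spec_biochem_order_aas
  have hsub' : ∀ a ∈ alphabet, a ∈ pvBiochem := hsub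
  have hinit : List.replicate pvBiochem.length false = pvSeenOf [] := by decide
  have hfold := pv_fold_inv alphabet [] hnd hsub' (by simp)
  unfold biochem_order_aas_alt
  rw [hinit, hfold]
  simp only [List.nil_append]
  rw [show pvSeenOf alphabet = pvBiochem.map (fun x => decide (x ∈ alphabet)) from rfl,
    pv_zip_filter_map pvBiochem (fun x => decide (x ∈ alphabet))]
  exact pv_A_filter alphabet hnd hsub
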